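-- pv_equiv track=rewrite | github.com/kingbuzzman/django-squash | django_squash/management/commands/lib/writer.py | find_brackets
-- ===== SOURCE A (Python) =====
-- def find_brackets(line, p_count, b_count):
--     for char in line:
--         if char == '(':
--             p_count += 1
--         elif char == ')':
--             p_count -= 1
--         elif char == '[':
--             b_count += 1
--         elif char == ']':
--             b_count -= 1
--     return p_count, b_count
-- ===== SOURCE B (Python) =====
-- _DELTA = {'(': (1, 0), ')': (-1, 0), '[': (0, 1), ']': (0, -1)}
--
--
-- def _net(s):
--     # divide and conquer: the net bracket delta of a string is the
--     # componentwise sum of the deltas of its two halves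
--     if not s:
--         return (0, 0)
--     if len(s) == 1:
--         return _DELTA.get(s, (0, 0))
--     mid = len(s) // 2
--     p1, b1 = _net(s[:mid])
--     p2, b2 = _net(s[mid:])
--     return (p1 + p2, b1 + b2)
--
--
-- def find_brackets(line, p_count, b_count):
--     dp, db = _net(line)
--     return p_count + dp, b_count + db
-- ===== Notes on version B (the rewrite author's own statement) =====
-- stated objective: alternative
-- what changed: Replaces A's sequential character loop with an if/elif state cascade by a divide-and-conquer reduction: the line is split in half recursively, each single character maps to a delta pair via a table, and halves combine by componentwise addition.
import Mathlib
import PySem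

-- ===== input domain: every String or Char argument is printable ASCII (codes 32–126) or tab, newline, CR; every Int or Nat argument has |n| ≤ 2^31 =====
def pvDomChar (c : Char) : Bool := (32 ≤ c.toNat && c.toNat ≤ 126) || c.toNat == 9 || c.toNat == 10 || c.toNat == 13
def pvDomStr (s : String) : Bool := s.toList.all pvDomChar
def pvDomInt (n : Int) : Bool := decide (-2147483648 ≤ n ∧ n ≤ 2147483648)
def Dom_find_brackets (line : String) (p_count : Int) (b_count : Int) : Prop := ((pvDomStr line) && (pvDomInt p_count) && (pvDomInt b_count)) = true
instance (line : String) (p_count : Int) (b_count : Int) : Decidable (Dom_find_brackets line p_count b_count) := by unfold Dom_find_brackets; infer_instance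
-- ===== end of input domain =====

-- B replaces A's sequential if/elif character loop by a divide-and-conquer reduction:
-- split the line in half recursively, map single characters to delta pairs via a table,
-- and combine halves by componentwise addition (objective: alternative, not faster).

-- ===== PORT A =====
-- literal port of A: one pass over the characters, an if/elif cascade updating (p_count, b_count)
def find_brackets (line : String) (p_count : Int) (b_count : Int) : Int × Int :=
  line.toList.foldl
    (fun (st : Int × Int) (char : Char) =>
      if char = '(' then (st.1 + 1, st.2)
      else if char = ')' then (st.1 - 1, st.2)
      else if char = '[' then (st.1, st.2 + 1)
      else if char = ']' then (st.1, st.2 - 1)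
      else st)
    (p_count, b_count)

-- ===== PORT B =====
-- the _DELTA table lookup of Source B (Dict.get with default (0,0))
def pvDelta (c : Char) : Int × Int :=
  PySem.Dict.getD
    (PySem.Dict.ofList [('(', ((1:Int), (0:Int))), (')', (-1, 0)), ('[', (0, 1)), (']', (0, -1))])
    c (0, 0)

-- literal port of Source B's _net: divide and conquer over the character list
def pvNet : List Char → Int × Int
  | [] => (0, 0)
  | [c] => pvDelta c
  | a :: b :: t =>
      let mid := (a :: b :: t).length / 2
      let lhalf := pvNet ((a :: b :: t).take mid)
      let rhalf := pvNet ((a :: b :: t).drop mid)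
      (lhalf.1 + rhalf.1, lhalf.2 + rhalf.2)
termination_by s => s.length
decreasing_by
  · simp [List.length_take]; omega
  · simp; omega

def find_brackets_alt (line : String) (p_count : Int) (b_count : Int) : Int × Int :=
  let (dp, db) := pvNet line.toList
  (p_count + dp, b_count + db)

-- ===== PRECONDITION & SPEC =====
def Spec_find_brackets (line : String) (p_count : Int) (b_count : Int) (out : Int × Int) : Prop := out = find_brackets_alt line p_count b_count
instance (line : String) (p_count : Int) (b_count : Int) (out : Int × Int) : Decidable (Spec_find_brackets line p_count b_count out) := by unfold Spec_find_brackets; infer_instance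

-- ===== CLAIM (what is proved, stated in full; the proofs are below) =====
def Claim_equal_find_brackets : Prop := ∀ (line : String) (p_count : Int) (b_count : Int), Dom_find_brackets line p_count b_count → Spec_find_brackets line p_count b_count (find_brackets line p_count b_count)

-- ===== LEMMAS AND PROOFS =====

-- ===== VERDICT (by name: the statement is the Claim_ definition above) =====
-- pvNet computes the net bracket counts of the list
theorem pvNet_eq_counts (l : List Char) :
    pvNet l = ((l.count '(' : Int) - (l.count ')' : Int),
               (l.count '[' : Int) - (l.count ']' : Int)) := by
  induction l using pvNet.induct with
  | case1 => simp [pvNet]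
  | case2 c =>
    rw [pvNet]
    by_cases h1 : c = '('
    · subst h1; decide
    by_cases h2 : c = ')'
    · subst h2; decide
    by_cases h3 : c = '['
    · subst h3; decide
    by_cases h4 : c = ']'
    · subst h4; decide
    have hofl : PySem.Dict.ofList
        [('(', ((1:Int), (0:Int))), (')', (-1, 0)), ('[', (0, 1)), (']', (0, -1))]
        = PySem.Dict.mk [('(', (1, 0)), (')', (-1, 0)), ('[', (0, 1)), (']', (0, -1))] := by rfl
    simp [pvDelta, hofl, PySem.Dict.getD, PySem.Dict.get?,
      Ne.symm h1, Ne.symm h2, Ne.symm h3, Ne.symm h4, h1, h2, h3, h4,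
      List.count_cons, List.count_nil]
  | case3 a b t mid ih1 ih2 =>
    have hmid : (a :: b :: t).length / 2 = mid := rfl
    have hc : ∀ c : Char, List.count c (a :: b :: t)
        = List.count c (List.take mid (a :: b :: t))
          + List.count c (List.drop mid (a :: b :: t)) := by
      intro c
      conv_lhs => rw [← List.take_append_drop mid (a :: b :: t)]
      rw [List.count_append]
    rw [pvNet, hmid, ih1, ih2]
    simp only [hc, Prod.mk.injEq]
    constructor <;> push_cast <;> ring

-- A's fold equals the closed combination of the four counts
theorem fold_eq_counts (l : List Char) (p b : Int) :
    l.foldl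
      (fun (st : Int × Int) (char : Char) =>
        if char = '(' then (st.1 + 1, st.2)
        else if char = ')' then (st.1 - 1, st.2)
        else if char = '[' then (st.1, st.2 + 1)
        else if char = ']' then (st.1, st.2 - 1)
        else st)
      (p, b)
    = (p + (l.count '(' : Int) - (l.count ')' : Int),
       b + (l.count '[' : Int) - (l.count ']' : Int)) := by
  induction l generalizing p b with
  | nil => simp
  | cons hd t ih =>
    simp only [List.foldl_cons]
    split_ifs with h1 h2 h3 h4 <;> subst_eqs <;> rw [ih] <;>
      simp_all [Prod.ext_iff] <;> omega

theorem find_brackets_spec : Claim_equal_find_brackets := by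
  intro line p b _
  show find_brackets line p b = find_brackets_alt line p b
  unfold find_brackets find_brackets_alt
  rw [fold_eq_counts, pvNet_eq_counts]
  simp [Prod.ext_iff]; omega
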